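-- pv_equiv track=rewrite | github.com/t4tarzan/seaclip-lite | app/services/github.py | latest_stage_from_labels
-- ===== SOURCE A (Python) =====
-- PIPELINE_STAGES = ["plan", "researched", "planned", "coded", "tested", "reviewed"]
--
-- def latest_stage_from_labels(labels: list[str]) -> str | None:
--     latest = None
--     latest_idx = -1
--     for label in labels:
--         if label in PIPELINE_STAGES:
--             idx = PIPELINE_STAGES.index(label)
--             if idx > latest_idx:
--                 latest_idx = idx
--                 latest = label
--     return latest
-- ===== SOURCE B (Python) =====
-- PIPELINE_STAGES = ["plan", "researched", "planned", "coded", "tested", "reviewed"]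
--
-- def latest_stage_from_labels(labels: list[str]) -> str | None:
--     for stage in reversed(PIPELINE_STAGES):
--         if stage in labels:
--             return stage
--     return None
-- ===== Notes on version B (the rewrite author's own statement) =====
-- stated objective: idiomatic
-- what changed: B scans the fixed priority list from highest stage down and returns the first stage present in labels, instead of A's pass over labels maintaining a running max index with repeated PIPELINE_STAGES.index lookups.
import Mathlib
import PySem

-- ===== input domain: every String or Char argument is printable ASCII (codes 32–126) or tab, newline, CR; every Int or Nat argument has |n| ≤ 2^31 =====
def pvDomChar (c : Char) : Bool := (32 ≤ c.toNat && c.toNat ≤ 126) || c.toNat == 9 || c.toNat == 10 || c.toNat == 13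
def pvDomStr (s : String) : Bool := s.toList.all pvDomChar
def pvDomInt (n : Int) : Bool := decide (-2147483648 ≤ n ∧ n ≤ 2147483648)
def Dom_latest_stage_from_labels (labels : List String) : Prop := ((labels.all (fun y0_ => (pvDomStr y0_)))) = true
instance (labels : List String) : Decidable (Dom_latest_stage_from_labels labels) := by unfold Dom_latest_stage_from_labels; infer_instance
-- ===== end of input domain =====

-- B replaces A's max-index scan over the labels by an idiomatic priority scan over the
-- fixed stage list from highest to lowest, returning the first stage present in labels.

def pvSTAGES : List String := ["plan", "researched", "planned", "coded", "tested", "reviewed"]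

-- ===== PORT A =====
-- Loop of A: state (latest, latest_idx); `label in PIPELINE_STAGES` → List.contains,
-- `PIPELINE_STAGES.index(label)` → PySem.List.index? (the none branch is unreachable: guarded by the membership test).
def latest_stage_from_labels_go (labels : List String) (latest : Option String) (latest_idx : Int) : Option String :=
  match labels with
  | [] => latest
  | label :: rest =>
    if pvSTAGES.contains label then
      match PySem.List.index? pvSTAGES label with
      | some idx =>
        if (idx : Int) > latest_idx then latest_stage_from_labels_go rest (some label) (idx : Int)
        else latest_stage_from_labels_go rest latest latest_idx
      | none => latest_stage_from_labels_go rest latest latest_idx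
    else latest_stage_from_labels_go rest latest latest_idx

def latest_stage_from_labels (labels : List String) : Option String :=
  latest_stage_from_labels_go labels none (-1)

-- ===== PORT B =====
-- `for stage in reversed(PIPELINE_STAGES): if stage in labels: return stage` / `return None`
def latest_stage_from_labels_alt_go (stages : List String) (labels : List String) : Option String :=
  match stages with
  | [] => none
  | s :: rest => if labels.contains s then some s else latest_stage_from_labels_alt_go rest labels

def latest_stage_from_labels_alt (labels : List String) : Option String :=
  latest_stage_from_labels_alt_go pvSTAGES.reverse labels

-- ===== PRECONDITION & SPEC =====
def Spec_latest_stage_from_labels (labels : List String) (out : Option String) : Prop := out = latest_stage_from_labels_alt labels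
instance (labels : List String) (out : Option String) : Decidable (Spec_latest_stage_from_labels labels out) := by unfold Spec_latest_stage_from_labels; infer_instance

-- ===== CLAIM (what is proved, stated in full; the proofs are below) =====
def Claim_equal_latest_stage_from_labels : Prop := ∀ (labels : List String), Dom_latest_stage_from_labels labels → Spec_latest_stage_from_labels labels (latest_stage_from_labels labels)

-- ===== LEMMAS AND PROOFS =====

-- the running maximum stage index that A's loop tracks
def pvM : List String → Int
  | [] => -1
  | l :: ls =>
    match PySem.List.index? pvSTAGES l with
    | some k => max (k : Int) (pvM ls)
    | none => pvM ls

-- the state a max-index i represents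
def pvToOpt (i : Int) : Option String := if 0 ≤ i then pvSTAGES[i.toNat]? else none

lemma pvM_range (ls : List String) : -1 ≤ pvM ls ∧ pvM ls ≤ 5 := by
  induction ls with
  | nil => simp [pvM]
  | cons l ls ih =>
    cases h : PySem.List.index? pvSTAGES l with
    | none => simp only [pvM, h]; exact ih
    | some k =>
      obtain ⟨hk, _, _⟩ := PySem.List.getElem_of_index?_eq_some h
      have hk6 : k < 6 := by simpa [pvSTAGES] using hk
      simp only [pvM, h]
      omega

lemma pvM_char (ls : List String) : pvM ls =
    if "reviewed" ∈ ls then 5 else if "tested" ∈ ls then 4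
    else if "coded" ∈ ls then 3 else if "planned" ∈ ls then 2
    else if "researched" ∈ ls then 1 else if "plan" ∈ ls then 0 else -1 := by
  induction ls with
  | nil => simp [pvM]
  | cons l ls ih =>
    cases h : PySem.List.index? pvSTAGES l with
    | none =>
      rw [PySem.List.index?_eq_none_iff] at h
      simp [pvSTAGES] at h
      obtain ⟨h1, h2, h3, h4, h5, h6⟩ := h
      cases hidx : PySem.List.index? pvSTAGES l with
      | some k =>
        have : l ∈ pvSTAGES := by rw [← PySem.List.index?_isSome_iff, hidx]; rfl
        simp [pvSTAGES, h1, h2, h3, h4, h5, h6] at this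
      | none =>
        simp only [pvM, hidx]
        rw [ih]
        simp [List.mem_cons, Ne.symm h1, Ne.symm h2, Ne.symm h3,
          Ne.symm h4, Ne.symm h5, Ne.symm h6]
    | some k =>
      obtain ⟨hk, hget, _⟩ := PySem.List.getElem_of_index?_eq_some h
      have hk6 : k < 6 := by simpa [pvSTAGES] using hk
      simp only [pvM, h]
      rw [ih]
      interval_cases k <;> simp [pvSTAGES] at hget <;> subst hget <;>
        simp [List.mem_cons] <;> split_ifs <;> omega

lemma pvGo_eq (ls : List String) : ∀ (i : Int), -1 ≤ i → i ≤ 5 →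
    latest_stage_from_labels_go ls (pvToOpt i) i = pvToOpt (max i (pvM ls)) := by
  induction ls with
  | nil =>
    intro i h1 h2
    simp only [latest_stage_from_labels_go, pvM]
    congr 1
    omega
  | cons l ls ih =>
    intro i h1 h2
    by_cases hc : pvSTAGES.contains l
    · have hmem : l ∈ pvSTAGES := by simpa using hc
      have hsome : (PySem.List.index? pvSTAGES l).isSome := by
        rw [PySem.List.index?_isSome_iff]; exact hmem
      cases h : PySem.List.index? pvSTAGES l with
      | none => rw [h] at hsome; simp at hsome
      | some k =>
        obtain ⟨hk, hget, _⟩ := PySem.List.getElem_of_index?_eq_some h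
        have hk6 : k < 6 := by simpa [pvSTAGES] using hk
        have hsl : some l = pvToOpt (k : Int) := by
          simp [pvToOpt, List.getElem?_eq_getElem hk, hget]
        simp only [latest_stage_from_labels_go, pvM, h, hc, if_true]
        by_cases hgt : (k : Int) > i
        · simp only [hgt, if_true]
          rw [hsl, ih (k : Int) (by omega) (by omega)]
          congr 1
          omega
        · simp only [hgt, if_false]
          rw [ih i h1 h2]
          congr 1
          omega
    · have hnone : PySem.List.index? pvSTAGES l = none := by
        rw [PySem.List.index?_eq_none_iff]; simpa using hc
      simp only [latest_stage_from_labels_go, pvM, hc, hnone]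
      simpa using ih i h1 h2

lemma pvAlt_eq (ls : List String) : latest_stage_from_labels_alt ls = pvToOpt (pvM ls) := by
  rw [pvM_char]
  simp only [latest_stage_from_labels_alt, pvSTAGES, List.reverse_cons, List.reverse_nil,
    List.nil_append, List.cons_append, latest_stage_from_labels_alt_go]
  split_ifs <;> simp_all [pvToOpt, pvSTAGES]

-- ===== VERDICT (by name: the statement is the Claim_ definition above) =====
theorem latest_stage_from_labels_spec : Claim_equal_latest_stage_from_labels := by
  intro labels _
  unfold Spec_latest_stage_from_labels latest_stage_from_labels
  have h := pvGo_eq labels (-1) (by omega) (by omega)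
  have h0 : pvToOpt (-1) = none := by simp [pvToOpt]
  rw [h0] at h
  rw [h, pvAlt_eq]
  congr 1
  have := pvM_range labels
  omega
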